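-- pv_equiv track=rewrite | github.com/NBNEORIGIN/signmakerv2 | generate_amazon_content.py | derive_parent_sku_from_description
-- ===== SOURCE A (Python) =====
-- def derive_parent_sku_from_description(description: str) -> str:
--     """
--     Derive parent SKU name from product description.
--     E.g., "Self Adhesive no public access aluminium sign" -> "NO_PUBLIC_ACCESS_PARENT"
--     """
--     # Extract the sign type from description
--     desc_lower = description.lower()
--
--     # Remove common prefixes
--     for prefix in ["self adhesive ", "pre-drilled ", "magnetic ", "suction "]:
--         if desc_lower.startswith(prefix):
--             desc_lower = desc_lower[len(prefix):]
--
--     # Remove common suffixes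
--     for suffix in [" aluminium sign", " aluminum sign", " sign", " metal sign"]:
--         if desc_lower.endswith(suffix):
--             desc_lower = desc_lower[:-len(suffix)]
--
--     # Convert to uppercase with underscores
--     parent_name = desc_lower.strip().upper().replace(" ", "_").replace("-", "_")
--
--     # Clean up multiple underscores
--     while "__" in parent_name:
--         parent_name = parent_name.replace("__", "_")
--
--     return f"{parent_name}_PARENT"
-- ===== SOURCE B (Python) =====
-- def derive_parent_sku_from_description(description: str) -> str:
--     """Single forward pass replaces the replace/replace/while-collapse stages of A."""
--     core = description.lower()
--     for prefix in ["self adhesive ", "pre-drilled ", "magnetic ", "suction "]: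
--         if core.startswith(prefix):
--             core = core[len(prefix):]
--     for suffix in [" aluminium sign", " aluminum sign", " sign", " metal sign"]:
--         if core.endswith(suffix):
--             core = core[:-len(suffix)]
--     core = core.strip().upper()
--     out = []
--     pending = False
--     for ch in core:
--         if ch in " -_":
--             pending = True
--         else:
--             if pending:
--                 out.append("_")
--                 pending = False
--             out.append(ch)
--     if pending:
--         out.append("_")
--     return "".join(out) + "_PARENT"
-- ===== Notes on version B (the rewrite author's own statement) =====
-- stated objective: alternative
-- what changed: The two global .replace passes plus the repeated-replace while loop that collapses double underscores are replaced by a single forward pass over the characters with a pending-separator flag that emits one underscore per separator run.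
import Mathlib
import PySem

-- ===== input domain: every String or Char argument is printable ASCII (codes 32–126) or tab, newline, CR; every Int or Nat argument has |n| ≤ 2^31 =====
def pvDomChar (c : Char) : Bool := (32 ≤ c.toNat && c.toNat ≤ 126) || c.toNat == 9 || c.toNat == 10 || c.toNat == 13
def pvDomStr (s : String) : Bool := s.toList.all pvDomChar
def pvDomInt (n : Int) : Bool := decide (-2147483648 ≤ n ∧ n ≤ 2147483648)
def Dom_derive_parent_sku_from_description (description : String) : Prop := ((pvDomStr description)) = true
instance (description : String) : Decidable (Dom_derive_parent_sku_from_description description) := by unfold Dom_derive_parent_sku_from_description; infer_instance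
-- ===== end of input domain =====

-- B replaces A's two global .replace passes and the quadratic while-"__" collapse loop by one
-- forward pass over the characters with a pending-separator flag (objective: alternative).

-- ===== PORT A =====
def pvPrefixes : List (List Char) :=
  ["self adhesive ".toList, "pre-drilled ".toList, "magnetic ".toList, "suction ".toList]
def pvSuffixes : List (List Char) :=
  [" aluminium sign".toList, " aluminum sign".toList, " sign".toList, " metal sign".toList]

-- shared first stage of both Pythons: lower, drop prefixes, drop suffixes, strip, upper
def pvCore (description : String) : List Char :=
  let d0 := PySem.Chars.lower description.toList
  let d1 := pvPrefixes.foldl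
    (fun s p => if PySem.Chars.startswith s p then PySem.Chars.slice s (some (p.length : Int)) none else s) d0
  let d2 := pvSuffixes.foldl
    (fun s suf => if PySem.Chars.endswith s suf then PySem.Chars.slice s none (some (-(suf.length : Int))) else s) d1
  PySem.Chars.upper (PySem.Chars.strip d2)

-- while "__" in p: p = p.replace("__", "_")   -- fuel p.length suffices: replace strictly shortens
def pvCollapse : Nat → List Char → List Char
  | 0, p => p
  | fuel + 1, p =>
    if PySem.Chars.isIn ['_', '_'] p then pvCollapse fuel (PySem.Chars.replace p ['_', '_'] ['_']) else p

def derive_parent_sku_from_description (description : String) : String :=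
  let pn := PySem.Chars.replace (PySem.Chars.replace (pvCore description) [' '] ['_']) ['-'] ['_']
  String.ofList (pvCollapse pn.length pn ++ "_PARENT".toList)

-- ===== PORT B =====
-- the single pass of Source B: pending separator flag, emit one '_' before the next kept char
def pvScan : Bool → List Char → List Char
  | pending, [] => if pending then ['_'] else []
  | pending, c :: t =>
    if c = ' ' ∨ c = '-' ∨ c = '_' then pvScan true t
    else if pending then '_' :: c :: pvScan false t else c :: pvScan false t

def derive_parent_sku_from_description_alt (description : String) : String :=
  String.ofList (pvScan false (pvCore description) ++ "_PARENT".toList)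

-- ===== PRECONDITION & SPEC =====
def Spec_derive_parent_sku_from_description (description : String) (out : String) : Prop := out = derive_parent_sku_from_description_alt description
instance (description : String) (out : String) : Decidable (Spec_derive_parent_sku_from_description description out) := by unfold Spec_derive_parent_sku_from_description; infer_instance

-- ===== CLAIM (what is proved, stated in full; the proofs are below) =====
def Claim_equal_derive_parent_sku_from_description : Prop := ∀ (description : String), Dom_derive_parent_sku_from_description description → Spec_derive_parent_sku_from_description description (derive_parent_sku_from_description description)

-- ===== LEMMAS AND PROOFS =====

-- canonical form: collapse every run of '_' to a single '_'
def pvSqueeze : List Char → List Char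
  | [] => []
  | [c] => [c]
  | a :: b :: t => if a = '_' ∧ b = '_' then pvSqueeze (b :: t) else a :: pvSqueeze (b :: t)

-- one global replace("__","_") pass
def pvRep : List Char → List Char
  | [] => []
  | [c] => [c]
  | a :: b :: t => if a = '_' ∧ b = '_' then '_' :: pvRep t else a :: pvRep (b :: t)

def pvSub (c : Char) : Char := if c = ' ' ∨ c = '-' then '_' else c

theorem pvSqueeze_head (l : List Char) : (pvSqueeze l).head? = l.head? := by
  induction l using pvSqueeze.induct with
  | case1 => rfl
  | case2 c => rfl
  | case3 a b t h ih =>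
    rcases h with ⟨rfl, rfl⟩
    rw [pvSqueeze, if_pos ⟨rfl, rfl⟩, ih]
    rfl
  | case4 a b t h ih =>
    rw [pvSqueeze, if_neg h]
    rfl

theorem pvSqueeze_cons (c : Char) (l : List Char) :
    pvSqueeze (c :: l) = if c = '_' ∧ l.head? = some '_' then pvSqueeze l else c :: pvSqueeze l := by
  cases l with
  | nil => simp [pvSqueeze]
  | cons b t => simp [pvSqueeze]

theorem pvSqueeze_cons_congr (c : Char) {x y : List Char} (h : pvSqueeze x = pvSqueeze y) :
    pvSqueeze (c :: x) = pvSqueeze (c :: y) := by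
  have hh : x.head? = y.head? := by
    rw [← pvSqueeze_head x, h, pvSqueeze_head]
  rw [pvSqueeze_cons, pvSqueeze_cons, hh, h]

theorem pvSqueeze_pvRep (l : List Char) : pvSqueeze (pvRep l) = pvSqueeze l := by
  induction l using pvRep.induct with
  | case1 => rfl
  | case2 c => rfl
  | case3 a b t h ih =>
    rcases h with ⟨rfl, rfl⟩
    rw [pvRep, if_pos ⟨rfl, rfl⟩]
    rw [show pvSqueeze ('_' :: '_' :: t) = pvSqueeze ('_' :: t) from by rw [pvSqueeze, if_pos ⟨rfl, rfl⟩]]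
    exact pvSqueeze_cons_congr '_' ih
  | case4 a b t h ih =>
    rw [pvRep, if_neg h]
    rw [show pvSqueeze (a :: b :: t) = pvSqueeze (a :: (b :: t)) from rfl]
    exact pvSqueeze_cons_congr a ih

theorem pvRep_length (l : List Char) : (pvRep l).length ≤ l.length := by
  induction l using pvRep.induct with
  | case1 => simp [pvRep]
  | case2 c => simp [pvRep]
  | case3 a b t h ih => rw [pvRep, if_pos h]; simp only [List.length_cons]; omega
  | case4 a b t h ih => rw [pvRep, if_neg h]; simp only [List.length_cons] at *; omega

theorem pvRep_length_lt {l : List Char} (h : ['_', '_'] <:+: l) : (pvRep l).length < l.length := by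
  induction l using pvRep.induct with
  | case1 => simp at h
  | case2 c =>
    exfalso
    have := h.length_le
    simp at this
  | case3 a b t hc ih =>
    rw [pvRep, if_pos hc]
    have := pvRep_length t
    simp only [List.length_cons]
    omega
  | case4 a b t hc ih =>
    rw [pvRep, if_neg hc]
    have hbt : ['_', '_'] <:+: b :: t := by
      rcases (List.infix_cons_iff.mp h) with hp | hi
      · exfalso
        rcases hp with ⟨r, hr⟩
        simp at hr
        exact hc ⟨hr.1.symm, hr.2.1.symm⟩
      · exact hi
    have := ih hbt
    simp only [List.length_cons] at *
    omega

theorem pvSqueeze_eq_self {l : List Char} (h : ¬ ['_', '_'] <:+: l) : pvSqueeze l = l := by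
  induction l using pvSqueeze.induct with
  | case1 => rfl
  | case2 c => rfl
  | case3 a b t hc ih =>
    exfalso
    exact h (by rw [hc.1, hc.2]; exact ⟨[], t, by simp⟩)
  | case4 a b t hc ih =>
    rw [pvSqueeze, if_neg hc]
    congr 1
    exact ih (fun hi => h (List.infix_cons_iff.mpr (Or.inr hi)))

theorem pvGo_dd (fuel : Nat) (l acc : List Char) (hf : l.length ≤ fuel) :
    PySem.Chars.replace.go ['_', '_'] ['_'] fuel l acc = acc.reverse ++ pvRep l := by
  induction fuel generalizing l acc with
  | zero =>
    have : l = [] := List.eq_nil_of_length_eq_zero (Nat.le_zero.mp hf)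
    subst this; simp [PySem.Chars.replace.go, pvRep]
  | succ fuel ih =>
    cases l with
    | nil => simp [PySem.Chars.replace.go, pvRep]
    | cons c t =>
      rw [PySem.Chars.replace.go]
      by_cases hp : List.isPrefixOf ['_', '_'] (c :: t)
      · rw [if_pos hp]
        cases t with
        | nil => simp [List.isPrefixOf] at hp
        | cons b t' =>
          simp only [List.isPrefixOf, Bool.and_eq_true, beq_iff_eq] at hp
          rcases hp with ⟨rfl, rfl, -⟩
          simp only [List.length_cons] at hf
          rw [show List.drop (['_', '_'] : List Char).length ('_' :: '_' :: t') = t' from rfl]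
          rw [ih _ _ (by omega)]
          rw [pvRep, if_pos ⟨rfl, rfl⟩]
          simp
      · rw [if_neg hp]
        simp only [List.length_cons] at hf
        rw [ih _ _ (by omega)]
        have hrep : pvRep (c :: t) = c :: pvRep t := by
          cases t with
          | nil => rfl
          | cons b t' =>
            simp only [List.isPrefixOf, Bool.and_eq_true, beq_iff_eq] at hp
            rw [pvRep, if_neg (by intro hcb; exact hp ⟨hcb.1.symm, hcb.2.symm, by simp⟩)]
        rw [hrep]
        simp

theorem pvReplace_dd (l : List Char) : PySem.Chars.replace l ['_', '_'] ['_'] = pvRep l := by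
  rw [PySem.Chars.replace]
  simp only [List.isEmpty_cons, Bool.false_eq_true, if_false]
  simpa using pvGo_dd l.length l [] le_rfl

theorem pvGo_single (a b : Char) (fuel : Nat) (l acc : List Char) (hf : l.length ≤ fuel) :
    PySem.Chars.replace.go [a] [b] fuel l acc
      = acc.reverse ++ l.map (fun c => if c = a then b else c) := by
  induction fuel generalizing l acc with
  | zero =>
    have : l = [] := List.eq_nil_of_length_eq_zero (Nat.le_zero.mp hf)
    subst this; simp [PySem.Chars.replace.go]
  | succ fuel ih =>
    cases l with
    | nil => simp [PySem.Chars.replace.go]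
    | cons c t =>
      rw [PySem.Chars.replace.go]
      simp only [List.length_cons] at hf
      by_cases hp : List.isPrefixOf [a] (c :: t)
      · rw [if_pos hp]
        simp only [List.isPrefixOf, Bool.and_eq_true, beq_iff_eq] at hp
        rcases hp with ⟨rfl, -⟩
        rw [show List.drop ([a] : List Char).length (a :: t) = t from rfl]
        rw [ih _ _ (by omega)]
        simp
      · rw [if_neg hp]
        simp only [List.isPrefixOf, Bool.and_eq_true, beq_iff_eq] at hp
        have hca : ¬ c = a := by intro h; exact hp ⟨h.symm, by simp⟩
        have hac : ¬ a = c := fun h => hca h.symm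
        rw [ih _ _ (by omega)]
        simp [hca]

theorem pvReplace_single (a b : Char) (l : List Char) :
    PySem.Chars.replace l [a] [b] = l.map (fun c => if c = a then b else c) := by
  rw [PySem.Chars.replace]
  simp only [List.isEmpty_cons, Bool.false_eq_true, if_false]
  simpa using pvGo_single a b l.length l [] le_rfl

theorem pvCollapse_eq (fuel : Nat) (l : List Char) (hf : l.length ≤ fuel) :
    pvCollapse fuel l = pvSqueeze l := by
  induction fuel generalizing l with
  | zero =>
    have : l = [] := List.eq_nil_of_length_eq_zero (Nat.le_zero.mp hf)
    subst this; rfl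
  | succ fuel ih =>
    rw [pvCollapse]
    by_cases hin : PySem.Chars.isIn ['_', '_'] l = true
    · rw [if_pos hin, pvReplace_dd]
      have hinf : ['_', '_'] <:+: l := (PySem.Chars.isIn_iff_infix _ _).mp hin
      have hlt := pvRep_length_lt hinf
      rw [ih (pvRep l) (by omega)]
      exact pvSqueeze_pvRep l
    · rw [if_neg hin]
      exact (pvSqueeze_eq_self ((PySem.Chars.isIn_eq_false_iff _ _).mp (by simpa using hin))).symm

theorem pvScan_eq (l : List Char) :
    pvScan false l = pvSqueeze (l.map pvSub) ∧ pvScan true l = pvSqueeze ('_' :: l.map pvSub) := by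
  induction l with
  | nil => exact ⟨rfl, rfl⟩
  | cons c t ih =>
    by_cases hsep : c = ' ' ∨ c = '-' ∨ c = '_'
    · have hsub : pvSub c = '_' := by
        rcases hsep with h | h | h <;> simp [pvSub, h]
      refine ⟨?_, ?_⟩
      · rw [pvScan, if_pos hsep, ih.2]
        simp [hsub]
      · rw [pvScan, if_pos hsep, ih.2]
        simp only [List.map_cons, hsub]
        rw [show pvSqueeze ('_' :: '_' :: List.map pvSub t) = pvSqueeze ('_' :: List.map pvSub t) from
          by rw [pvSqueeze, if_pos ⟨rfl, rfl⟩]]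
    · have hsub : pvSub c = c := by
        simp only [pvSub, if_neg (show ¬ (c = ' ' ∨ c = '-') by tauto)]
      have hne : c ≠ '_' := by tauto
      refine ⟨?_, ?_⟩
      · rw [pvScan, if_neg hsep]
        simp only [Bool.false_eq_true, if_false, List.map_cons, hsub]
        rw [pvSqueeze_cons, if_neg (fun h => hne h.1), ih.1]
      · rw [pvScan, if_neg hsep]
        simp only [if_true, List.map_cons, hsub]
        rw [pvSqueeze_cons '_' (c :: List.map pvSub t), if_neg (fun h => hne (by simpa using h.2))]
        rw [pvSqueeze_cons, if_neg (fun h => hne h.1), ih.1]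

theorem pvSub_comp (c : Char) :
    (if (if c = ' ' then '_' else c) = '-' then '_' else if c = ' ' then '_' else c) = pvSub c := by
  by_cases h1 : c = ' ' <;> by_cases h2 : c = '-' <;> simp [pvSub, h1, h2]

theorem pvMain (core : List Char) :
    pvCollapse (PySem.Chars.replace (PySem.Chars.replace core [' '] ['_']) ['-'] ['_']).length
        (PySem.Chars.replace (PySem.Chars.replace core [' '] ['_']) ['-'] ['_'])
      = pvScan false core := by
  rw [pvReplace_single, pvReplace_single, List.map_map]
  have hm : (core.map ((fun c => if c = '-' then '_' else c) ∘ fun c => if c = ' ' then '_' else c))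
      = core.map pvSub := List.map_congr_left (fun c _ => pvSub_comp c)
  rw [hm, pvCollapse_eq _ _ le_rfl, (pvScan_eq core).1]

-- ===== VERDICT (by name: the statement is the Claim_ definition above) =====
theorem derive_parent_sku_from_description_spec : Claim_equal_derive_parent_sku_from_description := by
  intro description _
  unfold Spec_derive_parent_sku_from_description derive_parent_sku_from_description derive_parent_sku_from_description_alt
  show String.ofList
      (pvCollapse (PySem.Chars.replace (PySem.Chars.replace (pvCore description) [' '] ['_']) ['-'] ['_']).length
        (PySem.Chars.replace (PySem.Chars.replace (pvCore description) [' '] ['_']) ['-'] ['_'])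
        ++ "_PARENT".toList)
    = String.ofList (pvScan false (pvCore description) ++ "_PARENT".toList)
  rw [pvMain]
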